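-- pv_equiv track=rewrite | github.com/freddiewanah/diffSimilarTech | code/tech_sentences+classify.py | contains_tech
-- ===== SOURCE A (Python) =====
-- def contains_tech(synonym, words):
--     """ Test if words contains synonym.
--
--         (str, [str]) -> bool
--     """
--     if "_" in synonym:
--         synonym_list = synonym.split("_")
--         n = len(synonym_list)
--         for i in range(len(words) - n + 1):
--             if synonym_list == words[i:i+n]:
--                 return True
--         return False
--     else:
--         return synonym in words
-- ===== SOURCE B (Python) =====
-- def contains_tech(synonym, words):
--     """ Test if words contains synonym.
--
--         (str, [str]) -> bool
--     """
--     if "_" not in synonym: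
--         return synonym in words
--     pat = synonym.split("_")
--     n = len(pat)
--     states = [0]  # lengths of pattern prefixes matched by suffixes of the words seen so far
--     for w in words:
--         nxt = [0]
--         for l in states:
--             if l < n and pat[l] == w:
--                 if l + 1 == n:
--                     return True
--                 nxt.append(l + 1)
--         states = nxt
--     return False
-- ===== Notes on version B (the rewrite author's own statement) =====
-- stated objective: alternative
-- what changed: Replaces A's slice-comparison of words[i:i+n] at every start index by a single left-to-right pass over words that maintains the set of pattern-prefix lengths currently matched (an NFA-style multi-state matcher), so no list slicing or restart scan is ever done.
import Mathlib
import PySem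

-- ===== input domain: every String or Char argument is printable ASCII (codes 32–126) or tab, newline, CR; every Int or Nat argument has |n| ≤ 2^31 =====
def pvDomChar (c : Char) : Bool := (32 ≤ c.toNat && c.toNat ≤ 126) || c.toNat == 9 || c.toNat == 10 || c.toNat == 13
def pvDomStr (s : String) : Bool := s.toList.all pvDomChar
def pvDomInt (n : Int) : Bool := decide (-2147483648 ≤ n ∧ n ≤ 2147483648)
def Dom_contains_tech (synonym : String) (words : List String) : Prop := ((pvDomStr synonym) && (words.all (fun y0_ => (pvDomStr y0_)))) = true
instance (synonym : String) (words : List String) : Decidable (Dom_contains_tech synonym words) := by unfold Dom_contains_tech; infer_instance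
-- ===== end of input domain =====

-- B replaces A's slice-comparison at every start index by a single left-to-right pass that
-- carries the set of partial-match lengths (an NFA-style multi-state matcher); objective: alternative.

-- ===== PORT A =====
-- 'for i in range(len(words) - n + 1): if synonym_list == words[i:i+n]: return True' / 'return False'
def loopA (synonym_list : List String) (n : Int) (words : List String) : List Int → Bool
  | [] => false
  | i :: rest =>
    if synonym_list == PySem.List.slice words (some i) (some (i + n)) then true
    else loopA synonym_list n words rest

def contains_tech (synonym : String) (words : List String) : Bool :=
  if PySem.Str.isIn "_" synonym then
    -- synonym.split("_"): the separator "_" is nonempty, so split? is always `some` here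
    let synonym_list := (PySem.Str.split? synonym "_").getD []
    let n : Int := synonym_list.length
    loopA synonym_list n words (PySem.List.pyRange 0 ((words.length : Int) - n + 1) 1)
  else
    words.contains synonym

-- ===== PORT B =====
-- inner loop 'for l in states:' building nxt (acc); `none` models B's early 'return True'
def innerB (pat : List String) (n : Nat) (w : String) : List Nat → List Nat → Option (List Nat)
  | acc, [] => some acc
  | acc, l :: rest =>
    if (decide (l < n) && (pat[l]? == some w)) = true then  -- 'l < n and pat[l] == w' (l < n keeps the index in range)
      if l + 1 = n then none
      else innerB pat n w (acc ++ [l + 1]) rest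
    else innerB pat n w acc rest

-- outer loop 'for w in words:' over the remaining words, threading states
def outerB (pat : List String) (n : Nat) : List Nat → List String → Bool
  | _, [] => false
  | states, w :: ws =>
    match innerB pat n w [0] states with
    | none => true
    | some nxt => outerB pat n nxt ws

def contains_tech_alt (synonym : String) (words : List String) : Bool :=
  if PySem.Str.isIn "_" synonym then
    let pat := (PySem.Str.split? synonym "_").getD []
    outerB pat pat.length [0] words
  else
    words.contains synonym

-- ===== PRECONDITION & SPEC =====
def Spec_contains_tech (synonym : String) (words : List String) (out : Bool) : Prop := out = contains_tech_alt synonym words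
instance (synonym : String) (words : List String) (out : Bool) : Decidable (Spec_contains_tech synonym words out) := by unfold Spec_contains_tech; infer_instance

-- ===== CLAIM (what is proved, stated in full; the proofs are below) =====
def Claim_equal_contains_tech : Prop := ∀ (synonym : String) (words : List String), Dom_contains_tech synonym words → Spec_contains_tech synonym words (contains_tech synonym words)

-- ===== LEMMAS AND PROOFS =====

-- Python's s.split(sep) always yields at least one piece.
lemma splitOn_go_length_ge (sep : List Char) (fuel : Nat) :
    ∀ (l cur : List Char) (acc : List (List Char)),
      (PySem.Chars.splitOn.go sep fuel l cur acc).length ≥ acc.length + 1 := by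
  induction fuel with
  | zero => intro l cur acc; simp [PySem.Chars.splitOn.go]
  | succ fuel ih =>
    intro l cur acc
    cases l with
    | nil => simp [PySem.Chars.splitOn.go]
    | cons c rest =>
      rw [PySem.Chars.splitOn.go]
      split
      · exact le_trans (by simp) (ih _ _ _)
      · exact ih _ _ _

lemma split_length_pos (s : String) : 0 < ((PySem.Str.split? s "_").getD []).length := by
  have h := splitOn_go_length_ge ['_'] (s.toList.length + 1) s.toList [] []
  simp only [PySem.Str.split?, PySem.Chars.split?, PySem.Chars.splitOn]
  rw [if_neg (by decide), show "_".toList = ['_'] from by decide]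
  simp only [Option.map_some, Option.getD_some, List.length_map]
  simp only [List.length_nil] at h
  omega

-- ===== A-side characterisation =====
lemma loopA_eq_true_iff (pat : List String) (n : Int) (words : List String) (idxs : List Int) :
    loopA pat n words idxs = true ↔
      ∃ i ∈ idxs, pat = PySem.List.slice words (some i) (some (i + n)) := by
  induction idxs with
  | nil => simp [loopA]
  | cons i rest ih =>
    simp only [loopA]
    split
    · rename_i h
      simp only [beq_iff_eq] at h
      exact ⟨fun _ => ⟨i, by simp, h⟩, fun _ => rfl⟩
    · rename_i h
      simp only [beq_iff_eq] at h
      rw [ih]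
      constructor
      · rintro ⟨j, hj, hsl⟩; exact ⟨j, by simp [hj], hsl⟩
      · rintro ⟨j, hj, hsl⟩
        rcases List.mem_cons.mp hj with rfl | hj
        · exact absurd hsl h
        · exact ⟨j, hj, hsl⟩

lemma take_drop_eq_iff_prefix (pat words : List String) (k : Nat) :
    (words.drop k).take pat.length = pat ↔ pat <+: words.drop k := by
  constructor
  · intro h; rw [← h]; exact List.take_prefix _ _
  · intro h; exact ((List.prefix_iff_eq_take.mp h)).symm

lemma infix_iff_exists_drop (pat words : List String) :
    pat <:+: words ↔ ∃ k : Nat, pat <+: words.drop k := by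
  constructor
  · intro h; obtain ⟨s, t, rfl⟩ := h; exact ⟨s.length, by simp⟩
  · rintro ⟨k, h⟩; exact h.isInfix.trans (words.drop_suffix k).isInfix

lemma exists_slice_iff_infix (pat words : List String) (hn : 0 < pat.length) :
    (∃ i ∈ PySem.List.pyRange 0 ((words.length : Int) - (pat.length : Int) + 1) 1,
        pat = PySem.List.slice words (some i) (some (i + (pat.length : Int)))) ↔
      pat <:+: words := by
  rw [infix_iff_exists_drop]
  constructor
  · rintro ⟨i, hi, hs⟩
    rw [PySem.List.mem_pyRange_one] at hi
    obtain ⟨k, rfl⟩ : ∃ k : Nat, i = (k : Int) := ⟨i.toNat, (Int.toNat_of_nonneg hi.1).symm⟩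
    rw [PySem.List.slice_natCast_add] at hs
    exact ⟨k, (take_drop_eq_iff_prefix pat words k).mp hs.symm⟩
  · rintro ⟨k, h⟩
    have hlen : pat.length ≤ (words.drop k).length := h.length_le
    simp only [List.length_drop] at hlen
    refine ⟨(k : Int), ?_, ?_⟩
    · rw [PySem.List.mem_pyRange_one]
      constructor
      · exact Int.natCast_nonneg k
      · omega
    · rw [PySem.List.slice_natCast_add]
      exact ((take_drop_eq_iff_prefix pat words k).mpr h).symm

-- ===== B-side characterisation =====
lemma innerB_eq_none_iff (pat : List String) (n : Nat) (w : String) :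
    ∀ (rest acc : List Nat),
      innerB pat n w acc rest = none ↔ ∃ l ∈ rest, l < n ∧ pat[l]? = some w ∧ l + 1 = n := by
  intro rest
  induction rest with
  | nil => intro acc; simp [innerB]
  | cons l rest ih =>
    intro acc
    simp only [innerB]
    split
    · rename_i h
      simp only [Bool.and_eq_true, decide_eq_true_eq, beq_iff_eq] at h
      split
      · rename_i he
        simp only [true_iff]
        exact ⟨l, by simp, h.1, h.2, he⟩
      · rename_i he
        rw [ih]
        constructor
        · rintro ⟨j, hj, hp⟩; exact ⟨j, by simp [hj], hp⟩
        · rintro ⟨j, hj, hp⟩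
          rcases List.mem_cons.mp hj with rfl | hj
          · exact absurd hp.2.2 he
          · exact ⟨j, hj, hp⟩
    · rename_i h
      simp only [Bool.and_eq_true, decide_eq_true_eq, beq_iff_eq, not_and] at h
      rw [ih]
      constructor
      · rintro ⟨j, hj, hp⟩; exact ⟨j, by simp [hj], hp⟩
      · rintro ⟨j, hj, hp⟩
        rcases List.mem_cons.mp hj with rfl | hj
        · exact absurd hp.2.1 (h hp.1)
        · exact ⟨j, hj, hp⟩

lemma innerB_eq_some (pat : List String) (n : Nat) (w : String) :
    ∀ (rest acc : List Nat),
      (¬ ∃ l ∈ rest, l < n ∧ pat[l]? = some w ∧ l + 1 = n) →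
      innerB pat n w acc rest =
        some (acc ++ (rest.filter (fun l => decide (l < n) && (pat[l]? == some w))).map (· + 1)) := by
  intro rest
  induction rest with
  | nil => intro acc _; simp [innerB]
  | cons l rest ih =>
    intro acc hne
    simp only [innerB]
    split
    · rename_i h
      have hne1 : l + 1 ≠ n := by
        intro he
        simp only [Bool.and_eq_true, decide_eq_true_eq, beq_iff_eq] at h
        exact hne ⟨l, by simp, h.1, h.2, he⟩
      rw [if_neg hne1, ih _ (fun ⟨j, hj, hp⟩ => hne ⟨j, by simp [hj], hp⟩)]
      simp [h]
    · rename_i h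
      rw [ih _ (fun ⟨j, hj, hp⟩ => hne ⟨j, by simp [hj], hp⟩)]
      simp only [List.filter_cons]
      rw [if_neg (by simpa using h)]

lemma drop_prefix_cons_iff (pat : List String) (l : Nat) (hl : l < pat.length)
    (w : String) (ws : List String) :
    pat.drop l <+: (w :: ws) ↔ pat[l]? = some w ∧ pat.drop (l + 1) <+: ws := by
  rw [List.drop_eq_getElem_cons hl, List.cons_prefix_cons]
  simp [List.getElem?_eq_getElem hl, eq_comm]

lemma outerB_eq_true_iff (pat : List String) (hn : 0 < pat.length) :
    ∀ (ws : List String) (states : List Nat),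
      0 ∈ states → (∀ l ∈ states, l < pat.length) →
      (outerB pat pat.length states ws = true ↔
        (∃ l ∈ states, pat.drop l <+: ws) ∨ pat <:+: ws) := by
  intro ws
  induction ws with
  | nil =>
    intro states _ hbound
    simp only [outerB]
    constructor
    · intro h; exact absurd h (by simp)
    · rintro (⟨l, hl, hp⟩ | hinf)
      · have := List.prefix_nil.mp hp
        have : pat.length ≤ l := by
          have := congrArg List.length this
          simp at this; omega
        exact absurd (hbound l hl) (by omega)
      · exact absurd (List.infix_nil.mp hinf) (by intro h; simp [h] at hn)
  | cons w ws ih =>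
    intro states h0 hbound
    simp only [outerB]
    by_cases hex : ∃ l ∈ states, l < pat.length ∧ pat[l]? = some w ∧ l + 1 = pat.length
    · rw [(innerB_eq_none_iff pat pat.length w states [0]).mpr hex]
      simp only [true_iff]
      obtain ⟨l, hl, hlt, hget, he⟩ := hex
      refine Or.inl ⟨l, hl, ?_⟩
      rw [drop_prefix_cons_iff pat l hlt w ws]
      exact ⟨hget, by simp [he]⟩
    · rw [innerB_eq_some pat pat.length w states [0] hex]
      set nxt := [0] ++ (states.filter (fun l => decide (l < pat.length) && (pat[l]? == some w))).map (· + 1) with hnxt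
      have h0n : 0 ∈ nxt := by simp [hnxt]
      have hbn : ∀ l ∈ nxt, l < pat.length := by
        intro l hl
        simp only [hnxt, List.mem_append, List.mem_map, List.mem_singleton, List.mem_filter,
          Bool.and_eq_true, decide_eq_true_eq, beq_iff_eq] at hl
        rcases hl with rfl | ⟨j, ⟨hj, hjlt, hjg⟩, rfl⟩
        · exact hn
        · have : j + 1 ≠ pat.length := fun he => hex ⟨j, hj, hjlt, hjg, he⟩
          omega
      rw [ih nxt h0n hbn, List.infix_cons_iff]
      constructor
      · rintro (⟨l', hl', hp⟩ | hinf)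
        · simp only [hnxt, List.mem_append, List.mem_map, List.mem_singleton, List.mem_filter,
            Bool.and_eq_true, decide_eq_true_eq, beq_iff_eq] at hl'
          rcases hl' with rfl | ⟨j, ⟨hj, hjlt, hjg⟩, rfl⟩
          · simp only [List.drop_zero] at hp
            exact Or.inr (Or.inr hp.isInfix)
          · exact Or.inl ⟨j, hj, (drop_prefix_cons_iff pat j hjlt w ws).mpr ⟨hjg, hp⟩⟩
        · exact Or.inr (Or.inr hinf)
      · rintro (⟨l, hl, hp⟩ | hpre | hinf)
        · have hlt := hbound l hl
          rw [drop_prefix_cons_iff pat l hlt w ws] at hp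
          have hne : l + 1 ≠ pat.length := fun he => hex ⟨l, hl, hlt, hp.1, he⟩
          refine Or.inl ⟨l + 1, ?_, hp.2⟩
          have hg : pat[l] = w := by
            have h1 := hp.1; rwa [List.getElem?_eq_getElem hlt, Option.some_inj] at h1
          simp only [hnxt, List.mem_append, List.mem_map, List.mem_filter]
          exact Or.inr ⟨l, by simp [hl, hlt, hg], rfl⟩
        · -- pat <+: w :: ws : use the state 0 ∈ states
          have hp := hpre
          rw [show pat = pat.drop 0 by simp] at hp
          rw [drop_prefix_cons_iff pat 0 hn w ws] at hp
          have hne : 0 + 1 ≠ pat.length := fun he => hex ⟨0, h0, hn, hp.1, he⟩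
          refine Or.inl ⟨1, ?_, hp.2⟩
          have hg : pat[0] = w := by
            have h1 := hp.1; rwa [List.getElem?_eq_getElem hn, Option.some_inj] at h1
          simp only [hnxt, List.mem_append, List.mem_map, List.mem_filter]
          exact Or.inr ⟨0, by simp [h0, hn, hg], rfl⟩
        · exact Or.inr hinf

-- ===== VERDICT (by name: the statement is the Claim_ definition above) =====
theorem contains_tech_spec : Claim_equal_contains_tech := by
  unfold Claim_equal_contains_tech
  intro synonym words _
  unfold Spec_contains_tech contains_tech contains_tech_alt
  split
  · set pat := (PySem.Str.split? synonym "_").getD [] with hpat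
    have hn : 0 < pat.length := split_length_pos synonym
    rw [show (loopA pat (pat.length : Int) words
        (PySem.List.pyRange 0 ((words.length : Int) - (pat.length : Int) + 1) 1) =
        outerB pat pat.length [0] words) from ?_]
    rw [Bool.eq_iff_iff, loopA_eq_true_iff, exists_slice_iff_infix pat words hn,
      outerB_eq_true_iff pat hn words [0] (by simp) (by simpa using hn)]
    constructor
    · exact fun h => Or.inr h
    · rintro (⟨l, hl, hp⟩ | h)
      · rw [List.mem_singleton] at hl; subst hl
        simpa using hp.isInfix
      · exact h
  · rfl
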